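-- pv_equiv track=rewrite | github.com/CjKhaled/University-of-Florida-Programming-Fundamentals-1 | numeric_conversion.py | hex_string_decode
-- ===== SOURCE A (Python) =====
-- db = {'a': 10, 'b': 11, 'c': 12, 'd': 13, 'e': 14, 'f': 15, '0': 0, '1': 1, '2': 2, '3': 3, '4': 4, '5': 5, '6': 6, '7': 7, '8': 8, '9': 9} #Database of values to be converted
--
-- def hex_string_decode(hex):
--     hex_input = list(hex) #Turning the string into a list of values
--     new_list = []
--     translated_list = []
--     answer_list = []
--     for item in hex_input:
--         if item == 'x':
--             continue
--         new = item.lower()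
--         new_list.append(new) #Filling a new list with lowered values
--     new_list.reverse()
--     for value in new_list:
--         for key, item in db.items():
--             if value == key:
--                 value = item
--                 translated_list.append(value) #Converting the values into hexadecimal
--
--     count = 0
--     for integer in translated_list:
--         product = integer * 16**count #Multiplying and adding it out. I reversed the list so I could increment exponents correctly
--         count += 1
--         answer_list.append(product)
--
--     decoded = sum(answer_list)
--
--     return decoded
-- ===== SOURCE B (Python) =====
-- db = {'a': 10, 'b': 11, 'c': 12, 'd': 13, 'e': 14, 'f': 15, '0': 0, '1': 1, '2': 2, '3': 3, '4': 4, '5': 5, '6': 6, '7': 7, '8': 8, '9': 9}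
--
-- def hex_string_decode(hex):
--     result = 0
--     for ch in hex:
--         if ch == 'x':
--             continue
--         d = db.get(ch.lower())
--         if d is not None:
--             result = result * 16 + d
--     return result
-- ===== Notes on version B (the rewrite author's own statement) =====
-- stated objective: simpler
-- what changed: Replaces the four-list pipeline (filter+lower, reverse, translate via a scan of db per digit, per-digit power 16**i and final sum) with a single left-to-right Horner pass result = result*16 + digit, skipping 'x' and unknown characters exactly as A drops them.
import Mathlib
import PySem

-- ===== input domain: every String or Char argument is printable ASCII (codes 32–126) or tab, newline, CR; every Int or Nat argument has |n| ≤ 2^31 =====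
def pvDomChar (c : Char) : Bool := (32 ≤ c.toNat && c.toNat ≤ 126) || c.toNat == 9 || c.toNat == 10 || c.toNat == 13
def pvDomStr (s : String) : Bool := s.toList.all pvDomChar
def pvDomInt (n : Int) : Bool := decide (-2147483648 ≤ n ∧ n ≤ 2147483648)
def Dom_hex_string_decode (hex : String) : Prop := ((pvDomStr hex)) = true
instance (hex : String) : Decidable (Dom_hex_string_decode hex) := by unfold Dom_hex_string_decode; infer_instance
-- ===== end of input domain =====

-- B replaces A's four-list pipeline (filter+lower, reverse, per-digit db scan, powers 16**i, sum)
-- with a single left-to-right Horner pass; same return value on every input.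


-- ===== PORT A =====
-- the module-level dict `db`, in insertion order
def dbL : List (Char × Int) :=
  [('a',10),('b',11),('c',12),('d',13),('e',14),('f',15),
   ('0',0),('1',1),('2',2),('3',3),('4',4),('5',5),('6',6),('7',7),('8',8),('9',9)]

-- inner 'for key, item in db.items()' loop body of A: once `value` has been replaced by an int,
-- Python's `value == key` (int vs str) is always False, modelled by the Sum state
def translateStep (acc : (Char ⊕ Int) × List Int) (kv : Char × Int) : (Char ⊕ Int) × List Int :=
  match acc.1 with
  | .inl c => if c == kv.1 then (.inr kv.2, acc.2 ++ [kv.2]) else acc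
  | .inr _ => acc

def hex_string_decode (hex : String) : Int :=
  let hex_input := hex.toList
  let new_list := hex_input.foldl (fun nl item => if item == 'x' then nl else nl ++ [item.toLower]) []
  let new_list := new_list.reverse
  let translated_list := new_list.foldl (fun tl value => (dbL.foldl translateStep (.inl value, tl)).2) []
  let st := translated_list.foldl
      (fun (st : Nat × List Int) integer => (st.1 + 1, st.2 ++ [integer * (16:Int) ^ st.1])) (0, [])
  st.2.sum

-- ===== PORT B =====
-- the loop body of Source B: skip 'x', Horner-accumulate the digit when db has the lowered char
def hstep (r : Int) (ch : Char) : Int :=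
  if ch == 'x' then r
  else match dbL.find? (fun kv => ch.toLower == kv.1) with
       | some kv => r * 16 + kv.2
       | none => r

def hex_string_decode_alt (hex : String) : Int :=
  hex.toList.foldl hstep 0

-- ===== PRECONDITION & SPEC =====
def Spec_hex_string_decode (hex : String) (out : Int) : Prop := out = hex_string_decode_alt hex
instance (hex : String) (out : Int) : Decidable (Spec_hex_string_decode hex out) := by unfold Spec_hex_string_decode; infer_instance

-- ===== CLAIM (what is proved, stated in full; the proofs are below) =====
def Claim_equal_hex_string_decode : Prop := ∀ (hex : String), Dom_hex_string_decode hex → Spec_hex_string_decode hex (hex_string_decode hex)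

-- ===== LEMMAS AND PROOFS =====

-- digit lookup as a ≤1-element list
def digL (c : Char) : List Int := ((dbL.find? (fun kv => c == kv.1)).map Prod.snd).toList

-- the contribution of one input character to the digit stream
def piece (ch : Char) : List Int := if ch == 'x' then [] else digL ch.toLower

-- little-endian value of a digit list
def lval : List Int → Int
  | [] => 0
  | d :: ds => d + 16 * lval ds

-- once the state is .inr, the inner fold is the identity
theorem translate_inr (L : List (Char × Int)) (n : Int) (tl : List Int) :
    L.foldl translateStep (.inr n, tl) = (.inr n, tl) := by
  induction L with
  | nil => rfl
  | cons kv L ih => simpa [translateStep] using ih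

-- the inner fold appends exactly the first match's value
theorem translate_find (L : List (Char × Int)) (c : Char) (tl : List Int) :
    (L.foldl translateStep (.inl c, tl)).2 =
      tl ++ ((L.find? (fun kv => c == kv.1)).map Prod.snd).toList := by
  induction L generalizing tl with
  | nil => simp
  | cons kv L ih =>
    by_cases h : c == kv.1
    · simp [List.foldl_cons, translateStep, h, translate_inr]
    · simp [List.foldl_cons, translateStep, h, ih]

-- A's first loop builds the lowered, 'x'-free character list
theorem newlist_eq (cs : List Char) (acc : List Char) :
    cs.foldl (fun nl item => if item == 'x' then nl else nl ++ [item.toLower]) acc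
      = acc ++ (cs.filter (fun c => !(c == 'x'))).map Char.toLower := by
  induction cs generalizing acc with
  | nil => simp
  | cons c cs ih =>
    rw [List.foldl_cons]
    by_cases h : c == 'x'
    · rw [if_pos h, ih]
      simp [h]
    · rw [if_neg h, ih, List.append_assoc]
      simp [h]

-- the filtered/lowered list's digit stream is the per-character piece stream
theorem digits_eq (cs : List Char) :
    ((cs.filter (fun c => !(c == 'x'))).map Char.toLower).flatMap digL = cs.flatMap piece := by
  induction cs with
  | nil => simp
  | cons c cs ih =>
    by_cases h : c == 'x' <;> simp [piece, h, ih]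

theorem digL_reverse (c : Char) : (digL c).reverse = digL c := by
  unfold digL
  cases dbL.find? (fun kv => c == kv.1) <;> simp

theorem lval_append_singleton (l : List Int) (d : Int) :
    lval (l ++ [d]) = lval l + d * 16 ^ l.length := by
  induction l with
  | nil => simp [lval]
  | cons e l ih => simp [lval, ih, pow_succ]; ring

-- A's powers-and-sum loop computes lval
theorem powers_loop (ds : List Int) (c : Nat) (al : List Int) :
    ((ds.foldl (fun (st : Nat × List Int) integer =>
        (st.1 + 1, st.2 ++ [integer * (16:Int) ^ st.1])) (c, al)).2).sum
      = al.sum + 16 ^ c * lval ds := by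
  induction ds generalizing c al with
  | nil => simp [lval]
  | cons d ds ih => simp [List.foldl_cons, ih, lval, pow_succ]; ring

-- A equals lval of the reversed digit stream
theorem hex_string_decode_eq_lval (hex : String) :
    hex_string_decode hex = lval (hex.toList.flatMap piece).reverse := by
  unfold hex_string_decode
  dsimp only
  rw [newlist_eq, List.nil_append]
  have htr : (fun (tl : List Int) (value : Char) => (dbL.foldl translateStep (.inl value, tl)).2)
      = fun tl value => tl ++ digL value := by
    funext tl v; rw [translate_find]; rfl
  rw [htr, PySem.List.foldl_append_eq_flatMap, List.nil_append, powers_loop]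
  have : (((hex.toList.filter (fun c => !(c == 'x'))).map Char.toLower).reverse.flatMap digL)
      = (hex.toList.flatMap piece).reverse := by
    rw [← digits_eq, List.reverse_flatMap]
    exact List.flatMap_congr (fun c _ => (digL_reverse c).symm)
  rw [this]
  simp

-- B's Horner fold, characterised via lval of the reversed digit stream
theorem horner_fold (cs : List Char) (r : Int) :
    cs.foldl hstep r
      = r * 16 ^ (cs.flatMap piece).length + lval (cs.flatMap piece).reverse := by
  induction cs generalizing r with
  | nil => simp [lval]
  | cons ch cs ih =>
    rw [List.foldl_cons, List.flatMap_cons]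
    by_cases hx : ch == 'x'
    · have h1 : hstep r ch = r := by simp [hstep, hx]
      have h2 : piece ch = [] := by simp [piece, hx]
      rw [h1, h2, List.nil_append, ih]
    · cases hfind : dbL.find? (fun kv => ch.toLower == kv.1) with
      | none =>
        have h1 : hstep r ch = r := by simp [hstep, hx, hfind]
        have h2 : piece ch = [] := by simp [piece, hx, digL, hfind]
        rw [h1, h2, List.nil_append, ih]
      | some kv =>
        have h1 : hstep r ch = r * 16 + kv.2 := by simp [hstep, hx, hfind]
        have h2 : piece ch = [kv.2] := by simp [piece, hx, digL, hfind]
        rw [h1, h2, ih]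
        have h3 : (([kv.2] ++ cs.flatMap piece)).reverse = (cs.flatMap piece).reverse ++ [kv.2] := by
          simp
        rw [h3, lval_append_singleton]
        simp [pow_succ]
        ring

-- ===== VERDICT (by name: the statement is the Claim_ definition above) =====
theorem hex_string_decode_spec : Claim_equal_hex_string_decode := by
  intro hex _
  unfold Spec_hex_string_decode hex_string_decode_alt
  rw [horner_fold, hex_string_decode_eq_lval]
  simp
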